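-- pv_equiv track=rewrite | github.com/QiZishi/MemScope | preference/habit_inference.py | _format_hour_range
-- ===== SOURCE A (Python) =====
-- from typing import Any, Dict, List, Optional, Tuple
--
-- def _format_hour_range(hours: List[int]) -> str:
--     """Format a list of hours into a human-readable range string."""
--     if not hours:
--         return "unknown"
--
--     sorted_hours = sorted(set(hours))
--
--     if len(sorted_hours) <= 2:
--         return ", ".join(f"{h:02d}:00" for h in sorted_hours)
--
--     # Group into contiguous ranges
--     ranges = []
--     start = sorted_hours[0]
--     end = sorted_hours[0]
--
--     for h in sorted_hours[1:]:
--         if h == end + 1: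
--             end = h
--         else:
--             ranges.append((start, end))
--             start = h
--             end = h
--     ranges.append((start, end))
--
--     parts = []
--     for s, e in ranges:
--         if s == e:
--             parts.append(f"{s:02d}:00")
--         else:
--             parts.append(f"{s:02d}:00-{e + 1:02d}:00")
--
--     return ", ".join(parts)
-- ===== SOURCE B (Python) =====
-- def _format_hour_range(hours):
--     """Format a list of hours into a human-readable range string."""
--     if not hours:
--         return "unknown"
--
--     sh = sorted(set(hours))
--
--     if len(sh) <= 2:
--         return ", ".join(f"{h:02d}:00" for h in sh)
--
--     # Gap-pair algorithm: a contiguous run ends at `a` and the next one starts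
--     # at `b` exactly for the adjacent pairs (a, b) with b != a + 1.
--     gaps = [(a, b) for a, b in zip(sh, sh[1:]) if b != a + 1]
--     starts = [sh[0]] + [b for _, b in gaps]
--     ends = [a for a, _ in gaps] + [sh[-1]]
--
--     return ", ".join(
--         f"{s:02d}:00" if s == e else f"{s:02d}:00-{e + 1:02d}:00"
--         for s, e in zip(starts, ends))
-- ===== Notes on version B (the rewrite author's own statement) =====
-- stated objective: alternative
-- what changed: Replaced A's sequential start/end state-machine loop that accumulates (start, end) ranges with a gap-pair formulation: filter the adjacent pairs of the sorted hours where b != a + 1, and zip the run starts ([sh[0]] + gap successors) with the run ends (gap predecessors + [sh[-1]]).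
import Mathlib
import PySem

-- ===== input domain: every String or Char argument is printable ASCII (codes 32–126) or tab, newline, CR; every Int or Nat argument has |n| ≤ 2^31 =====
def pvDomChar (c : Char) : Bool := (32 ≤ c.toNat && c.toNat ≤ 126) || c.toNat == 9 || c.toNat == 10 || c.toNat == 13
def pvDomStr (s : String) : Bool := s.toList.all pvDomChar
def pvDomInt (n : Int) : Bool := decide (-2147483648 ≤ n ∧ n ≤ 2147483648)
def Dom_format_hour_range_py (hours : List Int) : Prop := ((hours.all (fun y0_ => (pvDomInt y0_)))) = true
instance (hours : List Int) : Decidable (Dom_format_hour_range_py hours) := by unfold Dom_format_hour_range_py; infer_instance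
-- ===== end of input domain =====

-- B replaces A's start/end state-machine loop by filtering the adjacent gap pairs of the
-- sorted hours and zipping run starts with run ends (objective: alternative decomposition).


-- f"{h:02d}:00" (sign-aware zero pad to width 2 = str(h).zfill(2), exact)
def fmtHour (h : Int) : String := PySem.Str.zfill (PySem.Int.toStr h) 2 ++ ":00"

-- ===== PORT A =====
def format_hour_range_py (hours : List Int) : String :=
  if hours = [] then "unknown"
  else
    let sorted_hours := PySem.List.sorted (PySem.Set.ofList hours) (fun x => x) false
    if sorted_hours.length ≤ 2 then
      PySem.Str.join ", " (sorted_hours.map fmtHour)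
    else
      -- start = end = sorted_hours[0] (in range: sorted_hours ≠ [] here)
      let start := PySem.List.pyGetD sorted_hours 0 0
      let st := (PySem.List.slice sorted_hours (some 1) none).foldl
        (fun (st : List (Int × Int) × Int × Int) h =>
          if h = st.2.2 + 1 then (st.1, st.2.1, h)
          else (st.1 ++ [(st.2.1, st.2.2)], h, h))
        ([], start, start)
      let ranges := st.1 ++ [(st.2.1, st.2.2)]
      let parts := ranges.foldl (fun parts se =>
          parts ++ [if se.1 = se.2 then fmtHour se.1
                    else fmtHour se.1 ++ "-" ++ fmtHour (se.2 + 1)]) []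
      PySem.Str.join ", " parts

-- ===== PORT B =====
def format_hour_range_py_alt (hours : List Int) : String :=
  if hours = [] then "unknown"
  else
    let sh := PySem.List.sorted (PySem.Set.ofList hours) (fun x => x) false
    if sh.length ≤ 2 then
      PySem.Str.join ", " (sh.map fmtHour)
    else
      let gaps := (sh.zip (PySem.List.slice sh (some 1) none)).filter
        (fun p => !(p.2 == p.1 + 1))
      let starts := [PySem.List.pyGetD sh 0 0] ++ gaps.map (fun p => p.2)
      let ends := gaps.map (fun p => p.1) ++ [PySem.List.pyGetD sh (-1) 0]
      PySem.Str.join ", " ((starts.zip ends).map (fun se =>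
        if se.1 = se.2 then fmtHour se.1
        else fmtHour se.1 ++ "-" ++ fmtHour (se.2 + 1)))

-- ===== PRECONDITION & SPEC =====
def Spec_format_hour_range_py (hours : List Int) (out : String) : Prop := out = format_hour_range_py_alt hours
instance (hours : List Int) (out : String) : Decidable (Spec_format_hour_range_py hours out) := by unfold Spec_format_hour_range_py; infer_instance

-- ===== CLAIM (what is proved, stated in full; the proofs are below) =====
def Claim_equal_format_hour_range_py : Prop := ∀ (hours : List Int), Dom_format_hour_range_py hours → Spec_format_hour_range_py hours (format_hour_range_py hours)

-- ===== LEMMAS AND PROOFS =====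

-- the ranges A's loop produces, as a recursion
def aRanges (s e : Int) : List Int → List (Int × Int)
  | [] => [(s, e)]
  | h :: t => if h = e + 1 then aRanges s h t else (s, e) :: aRanges h h t

theorem foldA_eq_aRanges (xs : List Int) : ∀ (rs : List (Int × Int)) (s e : Int),
    (let st := xs.foldl
        (fun (st : List (Int × Int) × Int × Int) h =>
          if h = st.2.2 + 1 then (st.1, st.2.1, h)
          else (st.1 ++ [(st.2.1, st.2.2)], h, h)) (rs, s, e)
     st.1 ++ [(st.2.1, st.2.2)]) = rs ++ aRanges s e xs := by
  induction xs with
  | nil => intro rs s e; simp [aRanges]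
  | cons h t ih =>
    intro rs s e
    simp only [List.foldl_cons, aRanges]
    by_cases hc : h = e + 1
    · simp only [hc, if_pos]; exact ih rs s (e + 1)
    · simp only [if_neg hc]; rw [ih (rs ++ [(s, e)]) h h, List.append_assoc]; rfl

theorem gaps_eq_aRanges (rest : List Int) : ∀ (s e : Int),
    (let gaps := ((e :: rest).zip rest).filter (fun p => !(p.2 == p.1 + 1))
     ((s :: gaps.map (fun p => p.2)).zip (gaps.map (fun p => p.1) ++ [rest.getLastD e]))) =
    aRanges s e rest := by
  induction rest with
  | nil => intro s e; simp [aRanges]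
  | cons h t ih =>
    intro s e
    simp only [aRanges, List.zip_cons_cons, List.filter_cons, List.getLastD_cons]
    by_cases hc : h = e + 1
    · have hb : (!(h == e + 1)) = false := by simp [hc]
      rw [if_pos hc, hb]
      simp only [Bool.false_eq_true, if_false]
      exact ih s h
    · have hb : (!(h == e + 1)) = true := by simp [hc]
      rw [if_neg hc, hb, if_pos rfl]
      simp only [List.map_cons, List.cons_append, List.zip_cons_cons]
      exact congrArg (List.cons (s, e)) (ih h h)

theorem pyGetD_neg_one (v : Int) (rest : List Int) (d : Int) :
    PySem.List.pyGetD (v :: rest) (-1) d = rest.getLastD v := by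
  induction rest generalizing v with
  | nil => rfl
  | cons h t ih =>
    simp only [List.getLastD_cons]
    rw [← ih h]
    simp [PySem.List.pyGetD, PySem.List.pyGet?, PySem.List.pyIdx?]
    omega

-- ===== VERDICT (by name: the statement is the Claim_ definition above) =====
theorem format_hour_range_py_spec : Claim_equal_format_hour_range_py := by
  intro hours _
  unfold Spec_format_hour_range_py format_hour_range_py format_hour_range_py_alt
  by_cases h0 : hours = []
  · simp [h0]
  · simp only [if_neg h0]
    set sh := PySem.List.sorted (PySem.Set.ofList hours) (fun x => x) false with hsh
    by_cases h2 : sh.length ≤ 2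
    · simp [h2]
    · simp only [if_neg h2]
      have hne : sh ≠ [] := by
        intro hnil
        rw [hnil] at h2; simp at h2
      obtain ⟨v, rest, hvr⟩ := List.exists_cons_of_ne_nil hne
      rw [hvr, PySem.List.slice_from_one]
      simp only [List.tail_cons]
      have hget0 : PySem.List.pyGetD (v :: rest) 0 0 = v := by
        simp [PySem.List.pyGetD, PySem.List.pyGet?, PySem.List.pyIdx?]
      rw [hget0, pyGetD_neg_one]
      rw [foldA_eq_aRanges rest [] v v]
      rw [PySem.List.foldl_append_singleton_eq_map]
      rw [List.nil_append, ← gaps_eq_aRanges rest v v]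
      rfl
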